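-- pv_equiv track=rewrite | github.com/msmeeseeks/recidiviz-data | recidiviz/ingest/scrape/regions/us_co_mesa/us_co_mesa_scraper.py | _split_charge_text
-- ===== SOURCE A (Python) =====
-- def _split_charge_text(text):
--     assert text[-1] == ')'
--
--     # Find matching open paren
--     num_unmatched_closed = 0
--     split_index = None
--     for i, c in enumerate(reversed(text)):
--         if c == '(':
--             num_unmatched_closed -= 1
--             if not num_unmatched_closed:
--                 split_index = 0 - (i + 1)
--                 break
--         elif c == ')':
--             num_unmatched_closed += 1
--
--     assert split_index is not None
--     charge_name = text[:split_index]
--     charge_meta = text[split_index:][1:-1]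
--     return charge_name, charge_meta
-- ===== SOURCE B (Python) =====
-- def _split_charge_text(text):
--     assert text.endswith(')')
--
--     # Left-to-right scan: the matching open paren is the last '(' at which the
--     # running prefix balance equals the total balance of the whole string.
--     total = text.count('(') - text.count(')')
--     bal = 0
--     j = None
--     for k, c in enumerate(text):
--         if c == '(':
--             if bal == total:
--                 j = k
--             bal += 1
--         elif c == ')':
--             bal -= 1
--
--     assert j is not None
--     return text[:j], text[j + 1:-1]
-- ===== Notes on version B (the rewrite author's own statement) =====
-- stated objective: alternative
-- what changed: Replaces A's reversed right-to-left scan with an unmatched-close counter by a single left-to-right pass that records the last open paren whose running prefix balance equals the string's total balance, then slices directly at that index instead of via a negative split index.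
import Mathlib
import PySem

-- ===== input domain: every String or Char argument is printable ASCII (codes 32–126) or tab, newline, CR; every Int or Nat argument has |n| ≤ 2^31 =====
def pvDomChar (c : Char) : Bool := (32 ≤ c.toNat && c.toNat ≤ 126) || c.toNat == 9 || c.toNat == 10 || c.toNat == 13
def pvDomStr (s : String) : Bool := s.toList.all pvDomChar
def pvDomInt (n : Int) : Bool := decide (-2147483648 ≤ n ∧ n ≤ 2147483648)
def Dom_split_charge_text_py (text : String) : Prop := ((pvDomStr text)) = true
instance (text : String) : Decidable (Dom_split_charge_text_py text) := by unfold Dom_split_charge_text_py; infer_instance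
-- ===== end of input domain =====

-- B replaces A's reversed scan (unmatched-close counter, negative split index) by one
-- left-to-right pass recording the last top-level open paren and slicing there directly
-- (alternative decomposition, same cost). Inputs where A raises are excluded by Pre_.

-- ===== PORT A =====
-- the 'for i, c in enumerate(reversed(text))' loop with break: structural recursion on the reversed list
def pvFindA : List Char → Int → Nat → Option Int
  | [], _, _ => none
  | c :: rest, cnt, i =>
    if c = '(' then
      if cnt - 1 = 0 then some (0 - ((i : Int) + 1))
      else pvFindA rest (cnt - 1) (i + 1)
    else if c = ')' then pvFindA rest (cnt + 1) (i + 1)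
    else pvFindA rest cnt (i + 1)

def split_charge_text_py (text : String) : String × String :=
  let l := text.toList
  if PySem.List.pyGet? l (-1) = some ')' then      -- assert text[-1] == ')' (raises otherwise)
    match pvFindA l.reverse 0 0 with
    | some si =>
        (String.ofList (PySem.List.slice l none (some si)),
         String.ofList (PySem.List.slice (PySem.List.slice l (some si) none) (some 1) (some (-1))))
    | none => ("", "")                             -- assert split_index is not None (raises; outside Pre_)
  else ("", "")                                    -- raises; outside Pre_

-- ===== PORT B =====
-- state (bal, k, j) of Source B's single forward loop
def pvStepB (total : Int) (s : Int × Nat × Option Nat) (c : Char) : Int × Nat × Option Nat :=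
  if c = '(' then (s.1 + 1, s.2.1 + 1, if s.1 = total then some s.2.1 else s.2.2)
  else if c = ')' then (s.1 - 1, s.2.1 + 1, s.2.2)
  else (s.1, s.2.1 + 1, s.2.2)

def split_charge_text_py_alt (text : String) : String × String :=
  let l := text.toList
  if PySem.Chars.endswith l [')'] then             -- assert text.endswith(')')
    let total : Int := (PySem.Chars.count l ['('] : Int) - (PySem.Chars.count l [')'] : Int)
    match (l.foldl (pvStepB total) (0, 0, none)).2.2 with
    | some j =>
        (String.ofList (PySem.List.slice l none (some (j : Int))),
         String.ofList (PySem.List.slice l (some ((j : Int) + 1)) (some (-1))))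
    | none => ("", "")                             -- assert j is not None (raises; outside Pre_)
  else ("", "")                                    -- raises; outside Pre_

-- ===== PRECONDITION & SPEC =====
-- Pre_ = exactly the inputs where A returns: the text ends with a close paren and some
-- open paren starts a parenthesis-balanced suffix (A raises IndexError/AssertionError otherwise).
def Pre_split_charge_text_py (text : String) : Prop :=
  text.toList.getLast? = some ')' ∧
  ∃ j < text.toList.length, text.toList[j]? = some '(' ∧
    (text.toList.drop j).count '(' = (text.toList.drop j).count ')'
instance (text : String) : Decidable (Pre_split_charge_text_py text) := by
  unfold Pre_split_charge_text_py; infer_instance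

def pvWitness_split_charge_text_py : String := "Theft (F 18-4-401)"

def Spec_split_charge_text_py (text : String) (out : String × String) : Prop := out = split_charge_text_py_alt text
instance (text : String) (out : String × String) : Decidable (Spec_split_charge_text_py text out) := by unfold Spec_split_charge_text_py; infer_instance

-- ===== CLAIM (what is proved, stated in full; the proofs are below) =====
def Claim_equal_split_charge_text_py : Prop := ∀ (text : String), Dom_split_charge_text_py text → Pre_split_charge_text_py text → Spec_split_charge_text_py text (split_charge_text_py text)

-- ===== LEMMAS AND PROOFS =====

def pvBal (xs : List Char) : Int := (xs.count '(' : Int) - (xs.count ')' : Int)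

lemma pvBal_nil : pvBal [] = 0 := by simp [pvBal]

lemma pvBal_cons (c : Char) (xs : List Char) :
    pvBal (c :: xs) = (if c = '(' then 1 else if c = ')' then -1 else 0) + pvBal xs := by
  by_cases h1 : c = '('
  · subst h1; simp [pvBal, List.count_cons]; push_cast; ring
  · by_cases h2 : c = ')'
    · subst h2; simp [pvBal, List.count_cons]; push_cast; ring
    · simp [pvBal, List.count_cons, h1, h2]

lemma pvBal_append (xs ys : List Char) : pvBal (xs ++ ys) = pvBal xs + pvBal ys := by
  simp [pvBal, List.count_append]; push_cast; ring

-- components of B's loop state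
lemma pvStepB_state (xs : List Char) (T b : Int) (k : Nat) (j : Option Nat) :
    (xs.foldl (pvStepB T) (b, k, j)).1 = b + pvBal xs ∧
    (xs.foldl (pvStepB T) (b, k, j)).2.1 = k + xs.length := by
  induction xs generalizing b k j with
  | nil => simp [pvBal_nil]
  | cons c rest ih =>
    rw [List.foldl_cons, pvBal_cons]
    by_cases h1 : c = '('
    · rw [show pvStepB T (b, k, j) c = (b + 1, k + 1, if b = T then some k else j) from by
        simp [pvStepB, h1]]
      have := ih (b + 1) (k + 1) (if b = T then some k else j)
      refine ⟨by rw [this.1]; simp [h1]; ring, by rw [this.2]; simp; omega⟩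
    · by_cases h2 : c = ')'
      · rw [show pvStepB T (b, k, j) c = (b - 1, k + 1, j) from by simp [pvStepB, h1, h2]]
        have := ih (b - 1) (k + 1) j
        refine ⟨by rw [this.1]; simp [h1, h2]; ring, by rw [this.2]; simp; omega⟩
      · rw [show pvStepB T (b, k, j) c = (b, k + 1, j) from by simp [pvStepB, h1, h2]]
        have := ih b (k + 1) j
        refine ⟨by rw [this.1]; simp [h1, h2], by rw [this.2]; simp; omega⟩

-- index-free version of A's scan
def pvFirst : List Char → Int → Option Nat
  | [], _ => none
  | c :: rest, cnt =>
    if c = '(' then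
      if cnt - 1 = 0 then some 0 else (pvFirst rest (cnt - 1)).map (· + 1)
    else if c = ')' then (pvFirst rest (cnt + 1)).map (· + 1)
    else (pvFirst rest cnt).map (· + 1)

lemma pvFindA_eq (r : List Char) (cnt : Int) (i : Nat) :
    pvFindA r cnt i = (pvFirst r cnt).map (fun p => 0 - ((i : Int) + (p : Int) + 1)) := by
  induction r generalizing cnt i with
  | nil => simp [pvFindA, pvFirst]
  | cons c rest ih =>
    simp only [pvFindA, pvFirst]
    split_ifs with h1 h2 h3
    · simp
    · rw [ih]; cases hp : pvFirst rest (cnt - 1) <;> simp [hp] <;> push_cast <;> ring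
    · rw [ih]; cases hp : pvFirst rest (cnt + 1) <;> simp [hp] <;> push_cast <;> ring
    · rw [ih]; cases hp : pvFirst rest cnt <;> simp [hp] <;> push_cast <;> ring

lemma pvFirst_lt (r : List Char) (cnt : Int) (p : Nat) (h : pvFirst r cnt = some p) :
    p < r.length := by
  induction r generalizing cnt p with
  | nil => simp [pvFirst] at h
  | cons c rest ih =>
    simp only [pvFirst] at h
    split_ifs at h with h1 h2 h3
    · simp at h; simp [← h]
    all_goals
      simp only [Option.map_eq_some_iff] at h
      obtain ⟨q, hq, rfl⟩ := h
      have := ih _ _ hq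
      simp; omega

-- the bridge: B's forward scan computes A's reversed scan result, re-indexed from the left
lemma pvG (l : List Char) (cnt : Int) :
    (l.foldl (pvStepB (pvBal l - cnt)) (0, 0, none)).2.2 =
      (pvFirst l.reverse cnt).map (fun p => l.length - 1 - p) := by
  induction l using List.reverseRecOn generalizing cnt with
  | nil => simp [pvFirst]
  | append_singleton xs c ih =>
    rw [List.foldl_append, List.reverse_append]
    simp only [List.reverse_cons, List.reverse_nil, List.nil_append, List.singleton_append,
      List.foldl_cons, List.foldl_nil]
    by_cases h1 : c = '('
    · have hT : pvBal (xs ++ [c]) - cnt = pvBal xs - (cnt - 1) := by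
        rw [pvBal_append, pvBal_cons]; simp [h1, pvBal_nil]; ring
      rw [hT]
      have hst := pvStepB_state xs (pvBal xs - (cnt - 1)) 0 0 none
      rw [show pvStepB (pvBal xs - (cnt - 1)) (xs.foldl (pvStepB (pvBal xs - (cnt - 1))) (0, 0, none)) c
            = ((xs.foldl (pvStepB (pvBal xs - (cnt - 1))) (0, 0, none)).1 + 1,
               (xs.foldl (pvStepB (pvBal xs - (cnt - 1))) (0, 0, none)).2.1 + 1,
               if (xs.foldl (pvStepB (pvBal xs - (cnt - 1))) (0, 0, none)).1 = pvBal xs - (cnt - 1)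
               then some (xs.foldl (pvStepB (pvBal xs - (cnt - 1))) (0, 0, none)).2.1
               else (xs.foldl (pvStepB (pvBal xs - (cnt - 1))) (0, 0, none)).2.2) from by
        simp [pvStepB, h1]]
      simp only [hst.1, hst.2, Nat.zero_add, zero_add]
      simp only [pvFirst, h1, if_pos rfl]
      by_cases hc : cnt - 1 = 0
      · have : pvBal xs = pvBal xs - (cnt - 1) := by omega
        rw [if_pos this, if_pos hc]
        simp
      · have : ¬ (pvBal xs = pvBal xs - (cnt - 1)) := by omega
        rw [if_neg this, if_neg hc, ih (cnt - 1)]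
        cases hp : pvFirst xs.reverse (cnt - 1) <;> simp [hp] <;> omega
    · by_cases h2 : c = ')'
      · have hT : pvBal (xs ++ [c]) - cnt = pvBal xs - (cnt + 1) := by
          rw [pvBal_append, pvBal_cons]; simp [h1, h2, pvBal_nil]; ring
        rw [hT]
        rw [show pvStepB (pvBal xs - (cnt + 1)) (xs.foldl (pvStepB (pvBal xs - (cnt + 1))) (0, 0, none)) c
              = ((xs.foldl (pvStepB (pvBal xs - (cnt + 1))) (0, 0, none)).1 - 1,
                 (xs.foldl (pvStepB (pvBal xs - (cnt + 1))) (0, 0, none)).2.1 + 1,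
                 (xs.foldl (pvStepB (pvBal xs - (cnt + 1))) (0, 0, none)).2.2) from by
          simp [pvStepB, h1, h2]]
        simp only [pvFirst, h1, h2, if_neg, if_pos rfl, reduceIte]
        rw [ih (cnt + 1)]
        cases hp : pvFirst xs.reverse (cnt + 1) <;> simp [hp] <;> omega
      · have hT : pvBal (xs ++ [c]) - cnt = pvBal xs - cnt := by
          rw [pvBal_append, pvBal_cons]; simp [h1, h2, pvBal_nil]
        rw [hT]
        rw [show pvStepB (pvBal xs - cnt) (xs.foldl (pvStepB (pvBal xs - cnt)) (0, 0, none)) c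
              = ((xs.foldl (pvStepB (pvBal xs - cnt)) (0, 0, none)).1,
                 (xs.foldl (pvStepB (pvBal xs - cnt)) (0, 0, none)).2.1 + 1,
                 (xs.foldl (pvStepB (pvBal xs - cnt)) (0, 0, none)).2.2) from by
          simp [pvStepB, h1, h2]]
        simp only [pvFirst, h1, h2, reduceIte]
        rw [ih cnt]
        cases hp : pvFirst xs.reverse cnt <;> simp [hp] <;> omega

lemma pvScan_stays_some (xs : List Char) (T b : Int) (k j : Nat) :
    ∃ j', (xs.foldl (pvStepB T) (b, k, some j)).2.2 = some j' := by
  induction xs generalizing b k j with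
  | nil => exact ⟨j, rfl⟩
  | cons c rest ih =>
    rw [List.foldl_cons]
    by_cases h1 : c = '('
    · by_cases hb : b = T
      · rw [show pvStepB T (b, k, some j) c = (b + 1, k + 1, some k) from by simp [pvStepB, h1, hb]]
        exact ih _ _ _
      · rw [show pvStepB T (b, k, some j) c = (b + 1, k + 1, some j) from by simp [pvStepB, h1, hb]]
        exact ih _ _ _
    · by_cases h2 : c = ')'
      · rw [show pvStepB T (b, k, some j) c = (b - 1, k + 1, some j) from by simp [pvStepB, h1, h2]]
        exact ih _ _ _
      · rw [show pvStepB T (b, k, some j) c = (b, k + 1, some j) from by simp [pvStepB, h1, h2]]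
        exact ih _ _ _

lemma pvScan_hit (xs : List Char) (T : Int) (p : Nat) (b : Int) (k : Nat) (j : Option Nat)
    (hp : p < xs.length) (hg : xs[p]? = some '(') (hb : b + pvBal (xs.take p) = T) :
    ∃ j', (xs.foldl (pvStepB T) (b, k, j)).2.2 = some j' := by
  induction xs generalizing p b k j with
  | nil => simp at hp
  | cons c rest ih =>
    rw [List.foldl_cons]
    cases p with
    | zero =>
      simp at hg
      simp [List.take_zero, pvBal_nil] at hb
      rw [show pvStepB T (b, k, j) c = (b + 1, k + 1, some k) from by simp [pvStepB, hg, hb]]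
      exact pvScan_stays_some _ _ _ _ _
    | succ p =>
      simp only [List.length_cons] at hp
      simp only [List.getElem?_cons_succ] at hg
      rw [List.take_succ_cons, pvBal_cons] at hb
      by_cases h1 : c = '('
      · rw [show pvStepB T (b, k, j) c
            = (b + 1, k + 1, if b = T then some k else j) from by simp [pvStepB, h1]]
        exact ih p (b + 1) (k + 1) _ (by omega) hg (by simp [h1] at hb; omega)
      · by_cases h2 : c = ')'
        · rw [show pvStepB T (b, k, j) c = (b - 1, k + 1, j) from by simp [pvStepB, h1, h2]]
          exact ih p (b - 1) (k + 1) _ (by omega) hg (by simp [h1, h2] at hb; omega)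
        · rw [show pvStepB T (b, k, j) c = (b, k + 1, j) from by simp [pvStepB, h1, h2]]
          exact ih p b (k + 1) _ (by omega) hg (by simp [h1, h2] at hb; omega)


lemma pvCount_go_single (c : Char) (fuel : Nat) (l : List Char) (acc : Nat)
    (h : l.length ≤ fuel) : PySem.Chars.count.go [c] fuel l acc = acc + l.count c := by
  induction fuel generalizing l acc with
  | zero =>
    interval_cases hl : l.length
    · simp [List.length_eq_zero_iff] at hl; subst hl; simp [PySem.Chars.count.go]
  | succ fuel ih =>
    cases l with
    | nil => simp [PySem.Chars.count.go]
    | cons x t =>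
      by_cases hx : x = c
      · rw [show PySem.Chars.count.go [c] (fuel + 1) (x :: t) acc
            = PySem.Chars.count.go [c] fuel t (acc + 1) from by
          simp [PySem.Chars.count.go, hx, List.isPrefixOf]]
        rw [ih t (acc + 1) (by simpa using Nat.lt_succ_iff.mp (by simpa using h))]
        simp [hx, List.count_cons]; omega
      · rw [show PySem.Chars.count.go [c] (fuel + 1) (x :: t) acc
            = PySem.Chars.count.go [c] fuel t acc from by
          simp [PySem.Chars.count.go, List.isPrefixOf, hx]
          intro hc; exact absurd hc.symm hx]
        rw [ih t acc (by simpa using Nat.lt_succ_iff.mp (by simpa using h))]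
        simp [List.count_cons, hx]

lemma pvCount_single (l : List Char) (c : Char) : PySem.Chars.count l [c] = l.count c := by
  simp [PySem.Chars.count]
  rw [pvCount_go_single c l.length l 0 le_rfl]
  simp

lemma pvSlice_nat_negone (xs : List Char) (m : Nat) :
    PySem.List.slice xs (some (m : Int)) (some (-1)) = (xs.drop m).take (xs.length - 1 - m) := by
  simp [PySem.List.slice]
  by_cases h : m ≤ xs.length
  · rw [min_eq_left h]
  · have h1 : min m xs.length = xs.length := by omega
    rw [h1]
    have h2 : xs.drop xs.length = [] := by simp
    have h3 : xs.drop m = [] := List.drop_eq_nil_of_le (by omega)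
    simp [h2, h3]

lemma pvSlice_one_negone (xs : List Char) :
    PySem.List.slice xs (some 1) (some (-1)) = xs.tail.dropLast := by
  have h := pvSlice_nat_negone xs 1
  norm_num at h
  rw [h, List.dropLast_eq_take]
  congr 1
  simp [List.length_tail]

theorem pv_main (text : String)
    (hlast : text.toList.getLast? = some ')')
    (hex : ∃ j < text.toList.length, text.toList[j]? = some '(' ∧
      (text.toList.drop j).count '(' = (text.toList.drop j).count ')') :
    split_charge_text_py text = split_charge_text_py_alt text := by
  obtain ⟨j0, hj0, hget, hcnt⟩ := hex
  -- guards
  have hA : PySem.List.pyGet? text.toList (-1) = some ')' := by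
    rw [PySem.List.pyGet?_neg_one, hlast]
  have hsuf : [')'] <:+ text.toList := by
    obtain ⟨l', hl'⟩ := List.getLast?_eq_some_iff.mp hlast
    exact ⟨l', hl'.symm⟩
  have hB : PySem.Chars.endswith text.toList [')'] = true :=
    (PySem.Chars.endswith_iff _ _).mpr hsuf
  -- total = pvBal
  have htot : ((PySem.Chars.count text.toList ['('] : Int) - (PySem.Chars.count text.toList [')'] : Int))
      = pvBal text.toList := by
    rw [pvCount_single, pvCount_single]; rfl
  -- existence of a hit for B's scan
  have hbal0 : pvBal (text.toList.drop j0) = 0 := by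
    simp [pvBal]; omega
  have hsplit : pvBal text.toList = pvBal (text.toList.take j0) + pvBal (text.toList.drop j0) := by
    conv_lhs => rw [← List.take_append_drop j0 text.toList]
    exact pvBal_append _ _
  have hhit : (0 : Int) + pvBal (text.toList.take j0) = pvBal text.toList := by
    rw [hsplit, hbal0]; ring
  obtain ⟨J, hJ⟩ := pvScan_hit text.toList (pvBal text.toList) j0 0 0 none hj0 hget hhit
  -- relate to A's scan via pvG
  have hG := pvG text.toList 0
  rw [sub_zero, hJ] at hG
  obtain ⟨p, hp, hJp⟩ := Option.map_eq_some_iff.mp hG.symm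
  have hplt : p < text.toList.length := by
    have := pvFirst_lt _ _ _ hp
    simpa using this
  have hfa : pvFindA text.toList.reverse 0 0 = some (0 - ((0 : Int) + (p : Int) + 1)) := by
    rw [pvFindA_eq, hp]; rfl
  -- unfold both ports
  simp only [split_charge_text_py, split_charge_text_py_alt]
  rw [if_pos hA, if_pos hB, htot, hfa, hJ]
  have hneg : (0 - ((0 : Int) + (p : Int) + 1)) = -(((p + 1 : Nat) : Int)) := by push_cast; ring
  rw [hneg]
  have hname_a : PySem.List.slice text.toList none (some (-((p + 1 : Nat) : Int)))
      = text.toList.take (text.toList.length - (p + 1)) :=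
    PySem.List.slice_to_neg_natCast _ _ (by omega)
  have hfrom : PySem.List.slice text.toList (some (-((p + 1 : Nat) : Int))) none
      = text.toList.drop (text.toList.length - (p + 1)) :=
    PySem.List.slice_from_neg_natCast _ _ (by omega)
  have hJval : J = text.toList.length - 1 - p := hJp.symm
  have hname_b : PySem.List.slice text.toList none (some ((J : Nat) : Int))
      = text.toList.take J := PySem.List.slice_to_natCast _ _
  have hJ1 : ((J : Nat) : Int) + 1 = (((J + 1 : Nat)) : Int) := by push_cast; ring
  simp only []
  rw [hname_a, hname_b, hfrom, pvSlice_one_negone, hJ1, pvSlice_nat_negone]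
  have hdrop_eq : text.toList.length - (p + 1) = J := by omega
  rw [hdrop_eq, List.tail_drop, List.dropLast_eq_take, List.length_drop]
  congr 3
  omega

-- ===== VERDICT (by name: the statement is the Claim_ definition above) =====
theorem split_charge_text_py_spec : Claim_equal_split_charge_text_py := by
  intro text _ hpre
  unfold Pre_split_charge_text_py at hpre
  unfold Spec_split_charge_text_py
  exact pv_main text hpre.1 hpre.2
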